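-- pv_equiv track=rewrite | github.com/wrmsr/omlish | omdev/tests/test_findmagic.py | chop_magic_block
-- ===== SOURCE A (Python) =====
-- import typing as ta
--
-- def chop_magic_block(
--         magic_key: str,
--         prefix: str,
--         suffix: str,
--         lines: ta.Iterable[str],
-- ) -> list[str] | None:
--     out: list[str] = []
--     for i, line in enumerate(lines):
--         if not i:
--             if not line.startswith(prefix + magic_key):
--                 return None
--             s = line[len(prefix) + len(magic_key) + 1:]
--             if s.rstrip().endswith(suffix):
--                 out.append(s.rstrip()[:-len(suffix)])
--                 break
--             out.append(s)
--         elif line.rstrip().endswith(suffix):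
--             out.append(line.rstrip()[:-len(suffix)])
--             break
--         else:
--             out.append(line)
--     return out
-- ===== SOURCE B (Python) =====
-- def chop_magic_block(magic_key, prefix, suffix, lines):
--     lst = list(lines)
--     if not lst:
--         return []
--     if not lst[0].startswith(prefix + magic_key):
--         return None
--     body = [lst[0][len(prefix) + len(magic_key) + 1:]] + lst[1:]
--     stop = next((i for i, ln in enumerate(body) if ln.rstrip().endswith(suffix)), None)
--     if stop is None:
--         return body
--     return body[:stop] + [body[stop].rstrip()[:-len(suffix)]]
-- ===== Notes on version B (the rewrite author's own statement) =====
-- stated objective: alternative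
-- what changed: Replaces A's single accumulate-as-you-go enumerate loop (first-index special case plus duplicated suffix branch) by staged passes: build the transformed body list up front, locate the terminator with one index search (next over a generator / findIdx?), then produce the result by slicing body[:stop] and appending the chopped terminator.
import Mathlib
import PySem

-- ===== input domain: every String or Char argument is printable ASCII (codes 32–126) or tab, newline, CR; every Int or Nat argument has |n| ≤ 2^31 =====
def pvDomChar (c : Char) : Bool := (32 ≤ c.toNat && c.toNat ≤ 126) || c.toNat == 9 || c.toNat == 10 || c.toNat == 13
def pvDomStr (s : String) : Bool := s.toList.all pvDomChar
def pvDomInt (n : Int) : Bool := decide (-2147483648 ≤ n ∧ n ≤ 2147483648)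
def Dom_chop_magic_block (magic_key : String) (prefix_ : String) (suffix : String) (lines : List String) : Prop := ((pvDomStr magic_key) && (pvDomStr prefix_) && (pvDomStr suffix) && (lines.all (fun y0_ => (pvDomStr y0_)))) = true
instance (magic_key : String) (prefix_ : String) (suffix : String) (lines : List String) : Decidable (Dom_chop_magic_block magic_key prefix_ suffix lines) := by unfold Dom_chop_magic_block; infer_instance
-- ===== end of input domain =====

-- B replaces A's accumulate-as-you-go loop by staged passes (build body, search terminator index, slice); same values everywhere, no speed claim.

-- ===== PORT A =====
-- the enumerate loop of A: state is the accumulator `out`; `break` returns, exhaustion returns `out`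
def chopA_go (magic_key : String) (prefix_ : String) (suffix : String) :
    List (Int × String) → List String → Option (List String)
  | [], out => some out
  | (i, line) :: rest, out =>
    if i = 0 then
      if ¬ (PySem.Str.startswith line (prefix_ ++ magic_key)) then none
      else
        let s := PySem.Str.slice line (some ((PySem.Str.len prefix_ : Int) + (PySem.Str.len magic_key : Int) + 1)) none
        if PySem.Str.endswith (PySem.Str.rstrip s) suffix then
          some (out ++ [PySem.Str.slice (PySem.Str.rstrip s) none (some (-(PySem.Str.len suffix : Int)))])
        else chopA_go magic_key prefix_ suffix rest (out ++ [s])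
    else if PySem.Str.endswith (PySem.Str.rstrip line) suffix then
      some (out ++ [PySem.Str.slice (PySem.Str.rstrip line) none (some (-(PySem.Str.len suffix : Int)))])
    else chopA_go magic_key prefix_ suffix rest (out ++ [line])

def chop_magic_block (magic_key : String) (prefix_ : String) (suffix : String) (lines : List String) : Option (List String) :=
  chopA_go magic_key prefix_ suffix (PySem.List.enumerate lines) []

-- ===== PORT B =====
-- the terminator test of B's generator: `ln.rstrip().endswith(suffix)`
def chopB_isEnd (suffix : String) (ln : String) : Bool :=
  PySem.Str.endswith (PySem.Str.rstrip ln) suffix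

def chop_magic_block_alt (magic_key : String) (prefix_ : String) (suffix : String) (lines : List String) : Option (List String) :=
  match lines with
  | [] => some []
  | first :: rest =>
    if ¬ (PySem.Str.startswith first (prefix_ ++ magic_key)) then none
    else
      -- body = [first-line tail] + lst[1:]
      let body := PySem.Str.slice first (some ((PySem.Str.len prefix_ : Int) + (PySem.Str.len magic_key : Int) + 1)) none :: rest
      -- stop = next((i for i, ln in enumerate(body) if ln.rstrip().endswith(suffix)), None)
      match body.findIdx? (chopB_isEnd suffix) with
      | none => some body
      | some stop =>
        -- body[:stop] + [body[stop].rstrip()[:-len(suffix)]]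
        some (body.take stop ++ [PySem.Str.slice (PySem.Str.rstrip (body.getD stop "")) none (some (-(PySem.Str.len suffix : Int)))])

-- ===== PRECONDITION & SPEC =====
def Spec_chop_magic_block (magic_key : String) (prefix_ : String) (suffix : String) (lines : List String) (out : Option (List String)) : Prop := out = chop_magic_block_alt magic_key prefix_ suffix lines
instance (magic_key : String) (prefix_ : String) (suffix : String) (lines : List String) (out : Option (List String)) : Decidable (Spec_chop_magic_block magic_key prefix_ suffix lines out) := by unfold Spec_chop_magic_block; infer_instance

-- ===== CLAIM =====
def Claim_equal_chop_magic_block : Prop := ∀ (magic_key : String) (prefix_ : String) (suffix : String) (lines : List String), Dom_chop_magic_block magic_key prefix_ suffix lines → Spec_chop_magic_block magic_key prefix_ suffix lines (chop_magic_block magic_key prefix_ suffix lines)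

-- ===== LEMMAS AND PROOFS =====
-- B's search-then-slice result on a list, as a function (used only to state the bridge lemma)
def chopB_rest (suffix : String) (body : List String) : List String :=
  match body.findIdx? (chopB_isEnd suffix) with
  | none => body
  | some stop => body.take stop ++ [PySem.Str.slice (PySem.Str.rstrip (body.getD stop "")) none (some (-(PySem.Str.len suffix : Int)))]

-- A's loop on the tail (indices all positive, so never the i == 0 branch) equals B's search-then-slice
theorem chopA_go_eq_rest (magic_key prefix_ suffix : String) (xs : List String) :
    ∀ (st : Int), 0 < st → ∀ (out : List String),
      chopA_go magic_key prefix_ suffix (PySem.List.enumerate xs st) out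
        = some (out ++ chopB_rest suffix xs) := by
  induction xs with
  | nil => intro st _ out; simp [PySem.List.enumerate_nil, chopA_go, chopB_rest]
  | cons x xs ih =>
    intro st hst out
    rw [PySem.List.enumerate_cons]
    simp only [chopA_go]
    rw [if_neg (show ¬ st = 0 by omega)]
    by_cases h : chopB_isEnd suffix x = true
    · rw [if_pos (show PySem.Str.endswith (PySem.Str.rstrip x) suffix = true from h)]
      simp only [chopB_rest, List.findIdx?_cons, h, if_true]
      simp
    · rw [if_neg (show ¬ PySem.Str.endswith (PySem.Str.rstrip x) suffix = true from h),
        ih (st + 1) (by omega) (out ++ [x])]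
      rw [Bool.not_eq_true] at h
      simp only [chopB_rest, List.findIdx?_cons, h, Bool.false_eq_true, if_false]
      cases List.findIdx? (chopB_isEnd suffix) xs with
      | none => simp
      | some stop => simp [List.take_succ_cons]

theorem chop_magic_block_spec : Claim_equal_chop_magic_block := by
  intro magic_key prefix_ suffix lines _
  unfold Spec_chop_magic_block
  cases lines with
  | nil =>
      simp [chop_magic_block, chop_magic_block_alt, PySem.List.enumerate, chopA_go]
  | cons first rest =>
      rw [chop_magic_block, PySem.List.enumerate]
      simp only [chopA_go, chop_magic_block_alt]
      rw [if_pos trivial]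
      by_cases hpre : PySem.Str.startswith first (prefix_ ++ magic_key) = true
      · rw [if_neg (not_not_intro hpre), if_neg (not_not_intro hpre)]
        set s := PySem.Str.slice first (some ((PySem.Str.len prefix_ : Int) + (PySem.Str.len magic_key : Int) + 1)) none with hs
        by_cases hend : chopB_isEnd suffix s = true
        · rw [if_pos (show PySem.Str.endswith (PySem.Str.rstrip s) suffix = true from hend)]
          simp only [List.findIdx?_cons, hend, if_true]
          simp
        · rw [if_neg (show ¬ PySem.Str.endswith (PySem.Str.rstrip s) suffix = true from hend), zero_add]
          rw [List.nil_append, chopA_go_eq_rest magic_key prefix_ suffix rest 1 (by omega) [s]]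
          rw [Bool.not_eq_true] at hend
          simp only [chopB_rest, List.findIdx?_cons, hend, Bool.false_eq_true, if_false]
          cases List.findIdx? (chopB_isEnd suffix) rest with
          | none => simp
          | some stop => simp [List.take_succ_cons]
      · rw [if_pos hpre, if_pos hpre]
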